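-- pv_equiv track=rewrite | github.com/giladnass/Repo1 | Scripts/session_end.py | first_section
-- ===== SOURCE A (Python) =====
-- def first_section(text: str) -> str:
--     """Return the first ## section of a markdown body (for format reference)."""
--     lines = text.splitlines()
--     in_section = False
--     section_lines: list[str] = []
--     for line in lines:
--         if line.startswith("## "):
--             if in_section:
--                 break
--             in_section = True
--         if in_section:
--             section_lines.append(line)
--     return "\n".join(section_lines)
-- ===== SOURCE B (Python) =====
-- def _find_heading(lines):
--     for i, line in enumerate(lines):
--         if line.startswith("## "):
--             return i
--     return None
--
--
-- def first_section(text: str) -> str: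
--     """Return the first ## section of a markdown body (for format reference)."""
--     lines = text.splitlines()
--     start = _find_heading(lines)
--     if start is None:
--         return ""
--     tail = lines[start + 1:]
--     end_rel = _find_heading(tail)
--     end = len(lines) if end_rel is None else start + 1 + end_rel
--     return "\n".join(lines[start:end])
-- ===== Notes on version B (the rewrite author's own statement) =====
-- stated objective: alternative
-- what changed: Replaced the single scan that threads an in_section flag and break through one loop with a two-phase decomposition: find the start index and the end index of the section separately, then slice lines[start:end] and join.
import Mathlib
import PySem

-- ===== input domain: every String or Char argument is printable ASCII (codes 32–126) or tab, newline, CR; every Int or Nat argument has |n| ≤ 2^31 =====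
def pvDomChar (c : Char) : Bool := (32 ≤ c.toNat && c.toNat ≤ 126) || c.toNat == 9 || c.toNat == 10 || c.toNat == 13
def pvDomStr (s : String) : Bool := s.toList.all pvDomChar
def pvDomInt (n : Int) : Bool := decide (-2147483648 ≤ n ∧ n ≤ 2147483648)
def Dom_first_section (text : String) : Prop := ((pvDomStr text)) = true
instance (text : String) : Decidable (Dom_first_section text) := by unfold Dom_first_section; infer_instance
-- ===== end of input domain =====

-- B replaces A's single flag-threaded scan by a two-phase decomposition (find start index,
-- find end index, slice and join); objective: alternative structure, same cost.

-- ===== PORT A =====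
-- the for-loop of A with its in_section flag and break, as structural recursion
def fsLoopA : List String → Bool → List String → List String
  | [], _, acc => acc
  | l :: rest, ins, acc =>
    if PySem.Str.startswith l "## " then
      if ins then acc
      else fsLoopA rest true (acc ++ [l])
    else
      if ins then fsLoopA rest ins (acc ++ [l])
      else fsLoopA rest ins acc

def first_section (text : String) : String :=
  let lines := PySem.Str.splitlines text
  PySem.Str.join "\n" (fsLoopA lines false [])

-- ===== PORT B =====
-- Source B's _find_heading: index of the first line starting with "## ", if any
def fsFindHeading : List String → Option Nat
  | [] => none
  | l :: rest =>
    if PySem.Str.startswith l "## " then some 0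
    else (fsFindHeading rest).map (· + 1)

def first_section_alt (text : String) : String :=
  let lines := PySem.Str.splitlines text
  match fsFindHeading lines with
  | none => ""
  | some start =>
    let tail := PySem.List.slice lines (some ((start : Int) + 1)) none
    let endIdx : Nat :=
      match fsFindHeading tail with
      | none => lines.length
      | some e => start + 1 + e
    PySem.Str.join "\n" (PySem.List.slice lines (some (start : Int)) (some (endIdx : Int)))

-- ===== PRECONDITION & SPEC =====
def Spec_first_section (text : String) (out : String) : Prop := out = first_section_alt text
instance (text : String) (out : String) : Decidable (Spec_first_section text out) := by unfold Spec_first_section; infer_instance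

-- ===== CLAIM (what is proved, stated in full; the proofs are below) =====
def Claim_equal_first_section : Prop := ∀ (text : String), Dom_first_section text → Spec_first_section text (first_section text)

-- ===== LEMMAS AND PROOFS =====

-- once in_section is set, A collects lines up to (excluding) the next "## " line
theorem fsLoopA_true (lines : List String) : ∀ acc, fsLoopA lines true acc
    = acc ++ lines.takeWhile (fun l => !PySem.Str.startswith l "## ") := by
  induction lines with
  | nil => simp [fsLoopA]
  | cons l rest ih =>
    intro acc
    by_cases h : PySem.Str.startswith l "## " = true
    · have h' : PySem.Chars.startswith l.toList ['#', '#', ' '] = true := by simpa using h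
      simp [fsLoopA, h']
    · have h' : PySem.Chars.startswith l.toList ['#', '#', ' '] = false := by simpa using h
      simp [fsLoopA, h', ih]

-- taking up to the first heading index (or to the end) is takeWhile (no heading)
theorem take_fsFindHeading (lines : List String) :
    lines.take ((fsFindHeading lines).getD lines.length)
      = lines.takeWhile (fun l => !PySem.Str.startswith l "## ") := by
  induction lines with
  | nil => simp
  | cons l rest ih =>
    by_cases h : PySem.Str.startswith l "## " = true
    · have h' : PySem.Chars.startswith l.toList ['#', '#', ' '] = true := by simpa using h
      simp [fsFindHeading, h']
    · have h' : PySem.Chars.startswith l.toList ['#', '#', ' '] = false := by simpa using h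
      cases hf : fsFindHeading rest with
      | none =>
        rw [hf] at ih
        simp only [Option.getD_none] at ih
        simp [fsFindHeading, h', hf, List.take_succ_cons, ih]
      | some e =>
        rw [hf] at ih
        simp only [Option.getD_some] at ih
        simp [fsFindHeading, h', hf, List.take_succ_cons, ih]

-- the two line-collections agree on every list of lines
theorem fs_core (lines : List String) :
    fsLoopA lines false []
      = (match fsFindHeading lines with
         | none => ([] : List String)
         | some start =>
           let tail := PySem.List.slice lines (some ((start : Int) + 1)) none
           let endIdx : Nat :=
             match fsFindHeading tail with
             | none => lines.length
             | some e => start + 1 + e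
           PySem.List.slice lines (some (start : Int)) (some (endIdx : Int))) := by
  induction lines with
  | nil => simp [fsLoopA, fsFindHeading]
  | cons l rest ih =>
    by_cases h : PySem.Str.startswith l "## " = true
    · simp only [fsLoopA, fsFindHeading, h, if_true]
      rw [fsLoopA_true]
      simp only [List.nil_append]
      have h1 : ((0 : Nat) : Int) + 1 = ((1 : Nat) : Int) := by norm_num
      rw [h1, PySem.List.slice_from_natCast]
      simp only [List.drop_one, List.tail_cons]
      have ht := take_fsFindHeading rest
      cases hf : fsFindHeading rest with
      | none =>
        rw [hf] at ht
        simp only [Option.getD_none] at ht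
        simp only [List.length_cons]
        rw [PySem.List.slice_natCast]
        simp [List.take_succ_cons, ht]
      | some e =>
        rw [hf] at ht
        simp only [Option.getD_some] at ht
        rw [PySem.List.slice_natCast]
        simp [Nat.add_comm 1 e, List.take_succ_cons, ht]
    · have hb : PySem.Str.startswith l "## " = false := by simpa using h
      simp only [fsLoopA, fsFindHeading, hb, Bool.false_eq_true, if_false]
      rw [ih]
      cases hf : fsFindHeading rest with
      | none => simp
      | some s =>
        simp only [Option.map_some]
        have hsh : ((s + 1 : Nat) : Int) + 1 = ((s + 2 : Nat) : Int) := by push_cast; ring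
        have hsh' : ((s : Nat) : Int) + 1 = ((s + 1 : Nat) : Int) := by push_cast; ring
        rw [hsh, hsh', PySem.List.slice_from_natCast, PySem.List.slice_from_natCast]
        have hdrop : (l :: rest).drop (s + 2) = rest.drop (s + 1) := by simp
        rw [hdrop]
        cases hg : fsFindHeading (rest.drop (s + 1)) with
        | none =>
          simp only [List.length_cons]
          rw [PySem.List.slice_natCast, PySem.List.slice_natCast]
          simp [List.drop_succ_cons]
        | some e =>
          simp only []
          rw [PySem.List.slice_natCast, PySem.List.slice_natCast]
          have h2 : s + 1 + 1 + e = (s + 1 + e) + 1 := by ring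
          rw [h2]
          simp [List.drop_succ_cons]

-- the joined results agree (both ports, with splitlines generalized to any line list)
theorem fs_join (lines : List String) :
    PySem.Str.join "\n" (fsLoopA lines false [])
      = (match fsFindHeading lines with
         | none => ""
         | some start =>
           let tail := PySem.List.slice lines (some ((start : Int) + 1)) none
           let endIdx : Nat :=
             match fsFindHeading tail with
             | none => lines.length
             | some e => start + 1 + e
           PySem.Str.join "\n" (PySem.List.slice lines (some (start : Int)) (some (endIdx : Int)))) := by
  rw [fs_core]
  cases hf : fsFindHeading lines with
  | none => simp [PySem.Str.join]
  | some s => simp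

-- ===== VERDICT (by name: the statement is the Claim_ definition above) =====
theorem first_section_spec : Claim_equal_first_section := by
  intro text _
  show first_section text = first_section_alt text
  exact fs_join (PySem.Str.splitlines text)
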